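-- pv_equiv track=rewrite | github.com/xination/simple_crush_py | crush_py/agent/runtime.py | _looks_like_doc_understanding_prompt
-- ===== SOURCE A (Python) =====
-- def _looks_like_doc_understanding_prompt(prompt: str) -> bool:
--     lowered = prompt.lower()
--     return any(
--         term in lowered
--         for term in (
--             "instruction",
--             "instructions",
--             "doc",
--             "document",
--             "readme",
--             "guide",
--             "understand",
--             "explain",
--             "summarize",
--             "summary",
--         )
--     )
--     return None
-- ===== SOURCE B (Python) =====
-- KEYWORDS = ("instruction", "doc", "readme", "guide",
--             "understand", "explain", "summarize", "summary")
--
--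
-- def _looks_like_doc_understanding_prompt(prompt: str) -> bool:
--     lowered = prompt.lower()
--     for i in range(len(lowered)):
--         if any(lowered.startswith(k, i) for k in KEYWORDS):
--             return True
--     return False
-- ===== Notes on version B (the rewrite author's own statement) =====
-- stated objective: alternative
-- what changed: B makes a single left-to-right pass over the lowered string, testing at each position whether any keyword starts there (after dropping the redundant keywords 'instructions' and 'document', which are covered by 'instruction' and 'doc'), instead of A's ten separate full substring scans.
import Mathlib
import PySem

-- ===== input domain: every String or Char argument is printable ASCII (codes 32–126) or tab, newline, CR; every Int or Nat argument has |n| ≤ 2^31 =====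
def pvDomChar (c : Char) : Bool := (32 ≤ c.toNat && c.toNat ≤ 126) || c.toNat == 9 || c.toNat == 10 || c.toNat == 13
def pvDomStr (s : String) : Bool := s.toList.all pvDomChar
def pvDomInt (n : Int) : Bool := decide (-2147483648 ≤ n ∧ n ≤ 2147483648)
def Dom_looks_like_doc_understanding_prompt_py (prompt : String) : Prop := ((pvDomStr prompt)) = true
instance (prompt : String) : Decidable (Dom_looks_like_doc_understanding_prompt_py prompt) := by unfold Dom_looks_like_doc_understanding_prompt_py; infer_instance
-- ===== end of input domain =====

-- B: one left-to-right pass testing at each position whether a keyword starts there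
-- (redundant keywords 'instructions'/'document' dropped); return value only, alternative not faster.

-- ===== PORT A =====
-- any(term in lowered for term in (...)) over the ten literal keywords
def looks_like_doc_understanding_prompt_py (prompt : String) : Bool :=
  let lowered := PySem.Str.lower prompt
  ["instruction", "instructions", "doc", "document", "readme",
   "guide", "understand", "explain", "summarize", "summary"].any
    (fun term => PySem.Str.isIn term lowered)

-- ===== PORT B =====
def pvKeywords : List (List Char) :=
  ["instruction", "doc", "readme", "guide",
   "understand", "explain", "summarize", "summary"].map String.toList

-- the loop 'for i in range(len(lowered)): if any(lowered.startswith(k, i) ...)' as a scan over suffixes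
def pvScan : List Char → Bool
  | [] => false
  | c :: rest => pvKeywords.any (fun k => k.isPrefixOf (c :: rest)) || pvScan rest

def looks_like_doc_understanding_prompt_py_alt (prompt : String) : Bool :=
  pvScan (PySem.Str.lower prompt).toList

-- ===== PRECONDITION & SPEC =====
def Spec_looks_like_doc_understanding_prompt_py (prompt : String) (out : Bool) : Prop := out = looks_like_doc_understanding_prompt_py_alt prompt
instance (prompt : String) (out : Bool) : Decidable (Spec_looks_like_doc_understanding_prompt_py prompt out) := by unfold Spec_looks_like_doc_understanding_prompt_py; infer_instance

-- ===== CLAIM (what is proved, stated in full; the proofs are below) =====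
def Claim_equal_looks_like_doc_understanding_prompt_py : Prop := ∀ (prompt : String), Dom_looks_like_doc_understanding_prompt_py prompt → Spec_looks_like_doc_understanding_prompt_py prompt (looks_like_doc_understanding_prompt_py prompt)

-- ===== LEMMAS AND PROOFS =====

-- ===== VERDICT (by name: the statement is the Claim_ definition above) =====
lemma pvScan_iff (l : List Char) :
    pvScan l = true ↔ ∃ k ∈ pvKeywords, k <:+: l := by
  induction l with
  | nil =>
      simp [pvScan, pvKeywords, List.infix_nil]
  | cons c rest ih =>
      simp only [pvScan, Bool.or_eq_true, List.any_eq_true, ih]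
      constructor
      · rintro (⟨k, hk, hp⟩ | ⟨k, hk, hi⟩)
        · exact ⟨k, hk, (List.isPrefixOf_iff_prefix.mp hp).isInfix⟩
        · exact ⟨k, hk, hi.trans (List.suffix_cons c rest).isInfix⟩
      · rintro ⟨k, hk, hi⟩
        rcases List.infix_cons_iff.mp hi with hp | hi
        · exact Or.inl ⟨k, hk, List.isPrefixOf_iff_prefix.mpr hp⟩
        · exact Or.inr ⟨k, hk, hi⟩

lemma pvA_iff (s : String) :
    (["instruction", "instructions", "doc", "document", "readme",
      "guide", "understand", "explain", "summarize", "summary"].any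
        (fun term => PySem.Str.isIn term s)) = true ↔
    ∃ k ∈ pvKeywords, k <:+: s.toList := by
  simp only [List.any_eq_true, PySem.Str.isIn_iff_infix]
  constructor
  · rintro ⟨t, ht, hi⟩
    simp only [pvKeywords, List.mem_map, List.mem_cons, List.not_mem_nil, or_false] at *
    -- map the ten A-keywords onto the eight B-keywords
    rcases ht with h|h|h|h|h|h|h|h|h|h <;> subst h
    · exact ⟨"instruction".toList, by simp, hi⟩
    · exact ⟨"instruction".toList,  by simp,
        (List.IsPrefix.isInfix (l₂ := "instructions".toList) (by decide)).trans hi⟩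
    · exact ⟨"doc".toList, by simp, hi⟩
    · exact ⟨"doc".toList, by simp,
        (List.IsPrefix.isInfix (l₂ := "document".toList) (by decide)).trans hi⟩
    · exact ⟨"readme".toList, by simp, hi⟩
    · exact ⟨"guide".toList, by simp, hi⟩
    · exact ⟨"understand".toList, by simp, hi⟩
    · exact ⟨"explain".toList, by simp, hi⟩
    · exact ⟨"summarize".toList, by simp, hi⟩
    · exact ⟨"summary".toList, by simp, hi⟩
  · rintro ⟨k, hk, hi⟩
    simp only [pvKeywords, List.mem_map, List.mem_cons, List.not_mem_nil, or_false] at hk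
    obtain ⟨t, ht, rfl⟩ := hk
    rcases ht with h|h|h|h|h|h|h|h <;> subst h
    · exact ⟨"instruction", by simp, hi⟩
    · exact ⟨"doc", by simp, hi⟩
    · exact ⟨"readme", by simp, hi⟩
    · exact ⟨"guide", by simp, hi⟩
    · exact ⟨"understand", by simp, hi⟩
    · exact ⟨"explain", by simp, hi⟩
    · exact ⟨"summarize", by simp, hi⟩
    · exact ⟨"summary", by simp, hi⟩

-- ===== VERDICT (by name: the statement is the Claim_ definition above) =====
theorem looks_like_doc_understanding_prompt_py_spec : Claim_equal_looks_like_doc_understanding_prompt_py := by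
  intro prompt _
  unfold Spec_looks_like_doc_understanding_prompt_py
  unfold looks_like_doc_understanding_prompt_py looks_like_doc_understanding_prompt_py_alt
  rw [Bool.eq_iff_iff, pvScan_iff]
  exact pvA_iff (PySem.Str.lower prompt)
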